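-- pv_equiv track=rewrite | github.com/GeraldHebinck/rtc | python_ws/RTC_UE01_BMI/RTC_UE01_BMI.py | evaluateBMI
-- ===== SOURCE A (Python) =====
-- matrixBMI = ((19, 25, 35, 45, 55, 65),
--              (19, 20, 21, 22, 23, 24),
--              (24, 25, 26, 27, 28, 29))
--
-- def evaluateBMI(_bmi, age):
--     bmi_min = matrixBMI[1][-1]
--     bmi_max = matrixBMI[2][-1]
--     for i in range(len(matrixBMI[0])-2):
--         if(age < matrixBMI[0][i+1]):
--             bmi_min = matrixBMI[1][i]
--             bmi_max = matrixBMI[2][i]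
--             break
--     if (_bmi < bmi_min):
--         return "Untergewichtig"
--     elif (_bmi > bmi_max):
--         return "Uebergewichtig"
--     else:
--         return "Normalgewichtig"
-- ===== SOURCE B (Python) =====
-- _THRESHOLDS = [25, 35, 45, 55]
-- _MINS = [19, 20, 21, 22, 24]
-- _MAXES = [24, 25, 26, 27, 29]
--
-- def _bisect_right(xs, x):
--     lo, hi = 0, len(xs)
--     while lo < hi:
--         mid = (lo + hi) // 2
--         if x < xs[mid]:
--             hi = mid
--         else:
--             lo = mid + 1
--     return lo
--
-- def evaluateBMI(_bmi, age):
--     i = _bisect_right(_THRESHOLDS, age)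
--     bmi_min = _MINS[i]
--     bmi_max = _MAXES[i]
--     if _bmi < bmi_min:
--         return "Untergewichtig"
--     if _bmi > bmi_max:
--         return "Uebergewichtig"
--     return "Normalgewichtig"
-- ===== Notes on version B (the rewrite author's own statement) =====
-- stated objective: alternative
-- what changed: Replaces the linear scan of a 3-row matrix with a binary search (hand-written bisect_right) over a thresholds list indexing two flat min/max arrays whose last slot carries the defaults; the matrix and its break-loop disappear.
import Mathlib
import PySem

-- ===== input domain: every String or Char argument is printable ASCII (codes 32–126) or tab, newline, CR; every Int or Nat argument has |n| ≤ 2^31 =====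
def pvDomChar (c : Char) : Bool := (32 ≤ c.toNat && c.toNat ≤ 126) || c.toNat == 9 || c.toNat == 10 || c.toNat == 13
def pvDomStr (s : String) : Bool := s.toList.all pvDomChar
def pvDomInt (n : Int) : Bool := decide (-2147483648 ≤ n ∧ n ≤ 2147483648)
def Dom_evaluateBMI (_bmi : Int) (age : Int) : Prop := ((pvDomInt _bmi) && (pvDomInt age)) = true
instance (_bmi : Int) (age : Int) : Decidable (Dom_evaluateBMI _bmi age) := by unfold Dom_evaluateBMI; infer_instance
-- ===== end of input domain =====

-- B replaces A's linear matrix scan by a binary search over a thresholds list with flat min/max arrays (alternative structure, same values).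

-- ===== PORT A =====
def mBMI0 : List Int := [19, 25, 35, 45, 55, 65]
def mBMI1 : List Int := [19, 20, 21, 22, 23, 24]
def mBMI2 : List Int := [24, 25, 26, 27, 28, 29]

-- the for-loop with break: first i < len-2 with age < mBMI0[i+1] selects row1/row2 at i, else the defaults
def loopA (age : Int) (i : Nat) (acc : Int × Int) : Int × Int :=
  if i < mBMI0.length - 2 then
    if age < (PySem.List.pyGet? mBMI0 ((i : Int) + 1)).getD 0 then
      ((PySem.List.pyGet? mBMI1 (i : Int)).getD 0, (PySem.List.pyGet? mBMI2 (i : Int)).getD 0)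
    else loopA age (i + 1) acc
  else acc
termination_by mBMI0.length - 2 - i
decreasing_by omega

def evaluateBMI (_bmi : Int) (age : Int) : String :=
  let bmi_min := (PySem.List.pyGet? mBMI1 (-1)).getD 0
  let bmi_max := (PySem.List.pyGet? mBMI2 (-1)).getD 0
  let p := loopA age 0 (bmi_min, bmi_max)
  if _bmi < p.1 then "Untergewichtig"
  else if _bmi > p.2 then "Uebergewichtig"
  else "Normalgewichtig"

-- ===== PORT B =====
def bThresholds : List Int := [25, 35, 45, 55]
def bMins : List Int := [19, 20, 21, 22, 24]
def bMaxes : List Int := [24, 25, 26, 27, 29]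

-- hand-written bisect_right from Source B, step for step (lo/hi binary search)
def bisectR (xs : List Int) (x : Int) (lo hi : Nat) : Nat :=
  if lo < hi then
    let mid := (lo + hi) / 2
    if x < (PySem.List.pyGet? xs (mid : Int)).getD 0 then
      bisectR xs x lo mid
    else
      bisectR xs x (mid + 1) hi
  else lo
termination_by hi - lo
decreasing_by all_goals omega

def evaluateBMI_alt (_bmi : Int) (age : Int) : String :=
  let i := bisectR bThresholds age 0 bThresholds.length
  let bmi_min := (PySem.List.pyGet? bMins (i : Int)).getD 0
  let bmi_max := (PySem.List.pyGet? bMaxes (i : Int)).getD 0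
  if _bmi < bmi_min then "Untergewichtig"
  else if _bmi > bmi_max then "Uebergewichtig"
  else "Normalgewichtig"

-- ===== PRECONDITION & SPEC =====
def Spec_evaluateBMI (_bmi : Int) (age : Int) (out : String) : Prop := out = evaluateBMI_alt _bmi age
instance (_bmi : Int) (age : Int) (out : String) : Decidable (Spec_evaluateBMI _bmi age out) := by unfold Spec_evaluateBMI; infer_instance

-- ===== CLAIM (what is proved, stated in full; the proofs are below) =====
def Claim_equal_evaluateBMI : Prop := ∀ (_bmi : Int) (age : Int), Dom_evaluateBMI _bmi age → Spec_evaluateBMI _bmi age (evaluateBMI _bmi age)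

-- ===== LEMMAS AND PROOFS =====
theorem pair_eq (age : Int) :
    loopA age 0 ((PySem.List.pyGet? mBMI1 (-1)).getD 0, (PySem.List.pyGet? mBMI2 (-1)).getD 0)
      = ((PySem.List.pyGet? bMins ((bisectR bThresholds age 0 bThresholds.length : Nat) : Int)).getD 0,
         (PySem.List.pyGet? bMaxes ((bisectR bThresholds age 0 bThresholds.length : Nat) : Int)).getD 0) := by
  by_cases h1 : age < 25
  · simp [loopA, bisectR, mBMI0, mBMI1, mBMI2, bThresholds, bMins, bMaxes,
      PySem.List.pyGet?, PySem.List.pyIdx?, h1,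
      show age < 35 by omega, show age < 45 by omega]
  · by_cases h2 : age < 35
    · simp [loopA, bisectR, mBMI0, mBMI1, mBMI2, bThresholds, bMins, bMaxes,
        PySem.List.pyGet?, PySem.List.pyIdx?, h1, h2,
        show age < 45 by omega, show age < 55 by omega]
    · by_cases h3 : age < 45
      · simp [loopA, bisectR, mBMI0, mBMI1, mBMI2, bThresholds, bMins, bMaxes,
          PySem.List.pyGet?, PySem.List.pyIdx?, h1, h2, h3]
      · by_cases h4 : age < 55
        · simp [loopA, bisectR, mBMI0, mBMI1, mBMI2, bThresholds, bMins, bMaxes,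
            PySem.List.pyGet?, PySem.List.pyIdx?, h1, h2, h3, h4]
        · simp [loopA, bisectR, mBMI0, mBMI1, mBMI2, bThresholds, bMins, bMaxes,
            PySem.List.pyGet?, PySem.List.pyIdx?, h1, h2, h3, h4]

-- ===== VERDICT (by name: the statement is the Claim_ definition above) =====
theorem evaluateBMI_spec : Claim_equal_evaluateBMI := by
  intro _bmi age _
  unfold Spec_evaluateBMI
  simp only [evaluateBMI, evaluateBMI_alt, pair_eq]
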